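-- pv_equiv track=rewrite | github.com/besenbacher/DNM_distance | src/distance_functions.py | list_median
-- ===== SOURCE A (Python) =====
-- def list_median(L):
--     res = []
--     for i_index in range(len(L[0])):
--         i_sum = 0
--         tmp_L = []
--         for i_trial in range(len(L)):
--             tmp_L.append(L[i_trial][i_index])
--         tmp_L.sort()
--         res.append(tmp_L[len(tmp_L)//2])
--     return res
-- ===== SOURCE B (Python) =====
-- def _quickselect(xs, k):
--     # k-th smallest (0-based) by pivot partitioning
--     p = xs[0]
--     lt = [x for x in xs if x < p]
--     if k < len(lt):
--         return _quickselect(lt, k)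
--     eqn = len([x for x in xs if x == p])
--     if k < len(lt) + eqn:
--         return p
--     return _quickselect([x for x in xs if x > p], k - len(lt) - eqn)
--
-- def list_median(L):
--     k = len(L) // 2
--     return [_quickselect([row[i] for row in L], k) for i in range(len(L[0]))]
-- ===== Notes on version B (the rewrite author's own statement) =====
-- stated objective: alternative
-- what changed: Replaces the per-column sort-then-index with a pivot-partition quickselect for the len//2 order statistic, built from comprehension passes per column.
import Mathlib
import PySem

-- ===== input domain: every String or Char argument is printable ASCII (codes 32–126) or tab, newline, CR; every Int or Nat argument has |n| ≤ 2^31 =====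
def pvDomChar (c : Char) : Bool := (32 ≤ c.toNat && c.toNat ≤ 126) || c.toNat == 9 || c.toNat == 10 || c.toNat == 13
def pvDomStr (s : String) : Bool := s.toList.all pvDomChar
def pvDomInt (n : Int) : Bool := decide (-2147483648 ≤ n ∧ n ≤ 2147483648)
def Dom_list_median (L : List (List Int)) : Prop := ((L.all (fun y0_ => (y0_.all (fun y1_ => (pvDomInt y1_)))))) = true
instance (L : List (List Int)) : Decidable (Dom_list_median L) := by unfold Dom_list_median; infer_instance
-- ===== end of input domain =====

-- B replaces the per-column sort-then-index with a quickselect for the len//2 order statistic.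

-- ===== PORT A =====
-- literal port: for each i in range(len(L[0])) collect the column, sort it, take element len//2
def list_median (L : List (List Int)) : List Int :=
  (PySem.List.pyRange 0 (((PySem.List.pyGet? L 0).getD []).length : Int) 1).foldl
    (fun res i =>
      let tmp_L :=
        (PySem.List.pyRange 0 (L.length : Int) 1).foldl
          (fun t j => t ++ [(PySem.List.pyGet? ((PySem.List.pyGet? L j).getD []) i).getD 0]) []
      let s := PySem.List.sorted tmp_L (fun x => x) false
      res ++ [(PySem.List.pyGet? s (PySem.Int.floordiv (s.length : Int) 2)).getD 0])
    []

-- ===== PORT B =====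
-- port of _quickselect: k-th smallest by pivot partitioning ([] case only for totality;
-- Python indexes xs[0], which the recursion never reaches with an empty list)
def pvQsel (xs : List Int) (k : Nat) : Int :=
  match xs with
  | [] => 0
  | p :: t =>
    if k < ((p :: t).filter (fun x => decide (x < p))).length then
      pvQsel ((p :: t).filter (fun x => decide (x < p))) k
    else if k < ((p :: t).filter (fun x => decide (x < p))).length
              + ((p :: t).filter (fun x => x == p)).length then p
    else
      pvQsel ((p :: t).filter (fun x => decide (p < x)))
        (k - ((p :: t).filter (fun x => decide (x < p))).length
           - ((p :: t).filter (fun x => x == p)).length)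
termination_by xs.length
decreasing_by
  all_goals
    rw [List.filter_cons]
    simp only [lt_self_iff_false, decide_false, Bool.false_eq_true, if_false, List.length_cons]
    exact Nat.lt_succ_of_le (List.length_filter_le _ _)

def list_median_alt (L : List (List Int)) : List Int :=
  let k := L.length / 2
  (List.range (L.headD []).length).map (fun i => pvQsel (L.map (fun row => row.getD i 0)) k)

-- ===== PRECONDITION & SPEC =====
-- Pre_ excludes exactly the inputs where A raises an IndexError: empty L (L[0]) and
-- ragged inputs where some row is shorter than L[0] (L[i_trial][i_index]).
def Pre_list_median (L : List (List Int)) : Prop :=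
  L ≠ [] ∧ ∀ row ∈ L, (L.headD []).length ≤ row.length
instance (L : List (List Int)) : Decidable (Pre_list_median L) := by unfold Pre_list_median; infer_instance
def pvWitness_list_median : List (List Int) := [[3, 1], [2, 4], [5, 0]]
def Spec_list_median (L : List (List Int)) (out : List Int) : Prop := out = list_median_alt L
instance (L : List (List Int)) (out : List Int) : Decidable (Spec_list_median L out) := by unfold Spec_list_median; infer_instance

-- ===== CLAIM (what is proved, stated in full; the proofs are below) =====
def Claim_equal_list_median : Prop := ∀ (L : List (List Int)), Dom_list_median L → Pre_list_median L → Spec_list_median L (list_median L)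

-- ===== LEMMAS AND PROOFS =====

-- the three pivot-partition classes are a permutation of the list
lemma pvPerm_partition (p : Int) (xs : List Int) :
    ((xs.filter (fun x => decide (x < p))) ++ (xs.filter (fun x => x == p)) ++ (xs.filter (fun x => decide (p < x)))).Perm xs := by
  have h1 := List.filter_append_perm (fun x => decide (x < p)) xs
  have h2 := List.filter_append_perm (fun x => x == p) (xs.filter (fun x => !decide (x < p)))
  have e1 : (xs.filter (fun x => !decide (x < p))).filter (fun x => x == p)
      = xs.filter (fun x => x == p) := by
    rw [List.filter_filter]
    refine List.filter_congr ?_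
    intro x _
    by_cases h : x = p
    · have h2 : ¬ x < p := by omega
      simp [h2]
    · simp [h]
  have e2 : (xs.filter (fun x => !decide (x < p))).filter (fun x => !(x == p))
      = xs.filter (fun x => decide (p < x)) := by
    rw [List.filter_filter]
    refine List.filter_congr ?_
    intro x _
    by_cases h : x = p
    · simp [h]
    · by_cases h2 : x < p
      · simp only [h2, decide_true, Bool.not_true, Bool.and_false, Bool.false_eq, decide_eq_false_iff_not]
        omega
      · have h3 : p < x := by omega
        simp [h, h2, h3]
  rw [e1, e2] at h2
  rw [List.append_assoc]
  exact (h2.append_left _).trans h1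

-- sorting a list = sorted(lt) ++ eq ++ sorted(gt) for the pivot partition
lemma pvSortI_partition (p : Int) (xs : List Int) :
    PySem.List.sorted xs (fun x => x) false
      = PySem.List.sorted (xs.filter (fun x => decide (x < p))) (fun x => x) false
        ++ (xs.filter (fun x => x == p))
        ++ PySem.List.sorted (xs.filter (fun x => decide (p < x))) (fun x => x) false := by
  apply PySem.List.sorted_id_eq_of_perm_of_pairwise
  · refine List.Perm.trans ?_ (pvPerm_partition p xs)
    exact ((PySem.List.sorted_perm _ _ false).append (List.Perm.refl _)).append (PySem.List.sorted_perm _ _ false)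
  · have hlt : ∀ x ∈ PySem.List.sorted (xs.filter (fun x => decide (x < p))) (fun x => x) false, x < p := by
      intro x hx
      have := (PySem.List.mem_sorted _ _ _ x).mp hx
      simpa using (List.mem_filter.mp this).2
    have heq : ∀ x ∈ xs.filter (fun x => x == p), x = p := by
      intro x hx
      simpa using (List.mem_filter.mp hx).2
    have hgt : ∀ x ∈ PySem.List.sorted (xs.filter (fun x => decide (p < x))) (fun x => x) false, p < x := by
      intro x hx
      have := (PySem.List.mem_sorted _ _ _ x).mp hx
      simpa using (List.mem_filter.mp this).2
    rw [List.pairwise_append]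
    refine ⟨?_, ?_, ?_⟩
    · rw [List.pairwise_append]
      refine ⟨PySem.List.sorted_pairwise _ _, ?_, ?_⟩
      · exact List.pairwise_of_forall_mem_list (fun a ha b hb => by rw [heq a ha, heq b hb])
      · intro a ha b hb
        rw [heq b hb]; exact le_of_lt (hlt a ha)
    · exact PySem.List.sorted_pairwise _ _
    · intro a ha b hb
      rcases List.mem_append.mp ha with h | h
      · exact le_of_lt (lt_trans (hlt a h) (hgt b hb))
      · rw [heq a h]; exact le_of_lt (hgt b hb)

-- quickselect computes the k-th element of the sorted list
lemma pvQsel_correct (n : Nat) : ∀ (xs : List Int), xs.length = n → ∀ k, k < xs.length →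
    pvQsel xs k = (PySem.List.sorted xs (fun x => x) false).getD k 0 := by
  induction n using Nat.strong_induction_on with
  | _ n ih =>
    intro xs hn k hk
    cases xs with
    | nil => simp at hk
    | cons p t =>
      have hltlen : ((p :: t).filter (fun x => decide (x < p))).length < (p :: t).length := by
        rw [List.filter_cons]
        simp only [lt_self_iff_false, decide_false, Bool.false_eq_true, if_false, List.length_cons]
        exact Nat.lt_succ_of_le (List.length_filter_le _ _)
      have hgtlen : ((p :: t).filter (fun x => decide (p < x))).length < (p :: t).length := by
        rw [List.filter_cons]
        simp only [lt_self_iff_false, decide_false, Bool.false_eq_true, if_false, List.length_cons]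
        exact Nat.lt_succ_of_le (List.length_filter_le _ _)
      have hsum : ((p :: t).filter (fun x => decide (x < p))).length
          + ((p :: t).filter (fun x => x == p)).length
          + ((p :: t).filter (fun x => decide (p < x))).length = (p :: t).length := by
        have := (pvPerm_partition p (p :: t)).length_eq
        simp only [List.length_append] at this
        omega
      have hl1 : (PySem.List.sorted ((p :: t).filter (fun x => decide (x < p))) (fun x => x) false).length
          = ((p :: t).filter (fun x => decide (x < p))).length := PySem.List.length_sorted _ _ _
      have hl2 : (PySem.List.sorted ((p :: t).filter (fun x => decide (p < x))) (fun x => x) false).length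
          = ((p :: t).filter (fun x => decide (p < x))).length := PySem.List.length_sorted _ _ _
      rw [pvQsel, pvSortI_partition p (p :: t), List.append_assoc]
      split_ifs with h1 h2
      · rw [ih _ (by omega) _ rfl k h1, List.getD_append _ _ _ _ (by omega)]
      · rw [List.getD_append_right _ _ _ _ (by omega), List.getD_append _ _ _ _ (by omega)]
        have hidx : k - (PySem.List.sorted ((p :: t).filter (fun x => decide (x < p))) (fun x => x) false).length
            < ((p :: t).filter (fun x => x == p)).length := by omega
        rw [List.getD_eq_getElem _ _ hidx]
        have hmem := List.getElem_mem hidx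
        have hx := (List.mem_filter.mp hmem).2
        simp only [beq_iff_eq] at hx
        exact hx.symm
      · rw [ih _ (by omega) _ rfl _ (by omega),
           List.getD_append_right _ _ _ _ (by omega), List.getD_append_right _ _ _ _ (by omega)]
        congr 1
        omega

-- A's output value for one column index (the body of A's outer loop)
def pvGA (L : List (List Int)) (i : Int) : Int :=
  let tmp_L :=
    (PySem.List.pyRange 0 (L.length : Int) 1).foldl
      (fun t j => t ++ [(PySem.List.pyGet? ((PySem.List.pyGet? L j).getD []) i).getD 0]) []
  let s := PySem.List.sorted tmp_L (fun x => x) false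
  (PySem.List.pyGet? s (PySem.Int.floordiv (s.length : Int) 2)).getD 0

lemma pvListMedian_eq_map (L : List (List Int)) :
    list_median L
      = (PySem.List.pyRange 0 (((PySem.List.pyGet? L 0).getD []).length : Int) 1).map (pvGA L) := by
  show (PySem.List.pyRange 0 (((PySem.List.pyGet? L 0).getD []).length : Int) 1).foldl
      (fun res i => res ++ [pvGA L i]) [] = _
  rw [PySem.List.foldl_append_singleton_eq_map]
  simp

-- the column A collects equals the column B collects
lemma pvTmp_eq_col (L : List (List Int)) (i : Nat) (hrow : ∀ row ∈ L, i < row.length) :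
    (PySem.List.pyRange 0 (L.length : Int) 1).foldl
      (fun t j => t ++ [(PySem.List.pyGet? ((PySem.List.pyGet? L j).getD []) (i : Int)).getD 0]) []
      = L.map (fun row => row.getD i 0) := by
  rw [PySem.List.foldl_append_singleton_eq_map, PySem.List.pyRange_zero_natCast, List.map_map,
    List.nil_append]
  apply List.ext_getElem
  · simp
  · intro j h1 h2
    simp only [List.length_map, List.length_range] at h1
    have hj : L[j]? = some L[j] := List.getElem?_eq_getElem h1
    have hi : i < L[j].length := hrow _ (List.getElem_mem h1)
    simp only [List.getElem_map, List.getElem_range, Function.comp_apply,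
      PySem.List.pyGet?_natCast, hj, Option.getD_some]
    simp [List.getD_eq_getElem?_getD, List.getElem?_eq_getElem hi]

lemma pvGA_eq (L : List (List Int)) (hL : L ≠ []) (i : Nat) (hrow : ∀ row ∈ L, i < row.length) :
    pvGA L (i : Int) = pvQsel (L.map (fun row => row.getD i 0)) (L.length / 2) := by
  unfold pvGA
  rw [pvTmp_eq_col L i hrow]
  show (PySem.List.pyGet? (PySem.List.sorted (L.map (fun row => row.getD i 0)) (fun x => x) false)
      (PySem.Int.floordiv
        (((PySem.List.sorted (L.map (fun row => row.getD i 0)) (fun x => x) false).length : Int)) 2)).getD 0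
    = _
  have hlen : (PySem.List.sorted (L.map (fun row => row.getD i 0)) (fun x => x) false).length
      = L.length := by rw [PySem.List.length_sorted, List.length_map]
  have hpos : 0 < L.length := List.length_pos_iff.mpr hL
  have hhalf : L.length / 2 < L.length := Nat.div_lt_self hpos (by omega)
  rw [pvQsel_correct _ _ rfl _ (by simpa using hhalf)]
  rw [hlen, PySem.Int.floordiv_eq_ediv_of_pos (by norm_num),
    show ((L.length : Int)) / 2 = ((L.length / 2 : Nat) : Int) from by omega,
    PySem.List.pyGet?_natCast, List.getD_eq_getElem?_getD]

-- ===== VERDICT (by name: the statement is the Claim_ definition above) =====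
theorem list_median_spec : Claim_equal_list_median := by
  intro L _ hPre
  obtain ⟨hne, hrows⟩ := hPre
  unfold Spec_list_median list_median_alt
  rw [pvListMedian_eq_map]
  obtain ⟨r, rs, rfl⟩ : ∃ r rs, L = r :: rs := by
    cases L with
    | nil => exact absurd rfl hne
    | cons r rs => exact ⟨r, rs, rfl⟩
  have h0 : (PySem.List.pyGet? (r :: rs) 0).getD [] = r := by
    simp
  rw [h0]
  rw [PySem.List.pyRange_zero_natCast, List.map_map]
  simp only [List.headD_cons]
  apply List.map_congr_left
  intro i hi
  have hi' : i < r.length := List.mem_range.mp hi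
  have hrow : ∀ row ∈ (r :: rs), i < row.length := by
    intro row hr
    have := hrows row hr
    simp only [List.headD_cons] at this
    omega
  simpa using pvGA_eq (r :: rs) (by simp) i hrow
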